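-- pv_equiv track=rewrite | github.com/anton-pershin/thequickmath | thequickmath/field.py | build_left_index_map_between_arrays
-- ===== SOURCE A (Python) =====
-- def build_left_index_map_between_arrays(orig_coord_array, new_coord_array):
--     def search_for_next_left_index(array, start_index, value):
--         left_index_ = start_index
--         for i in range(start_index, len(array)):
--             if array[i] > value:
--                 left_index_ = i - 1
--                 break
--         return left_index_
--
--     last_left_index = 0
--     left_indexes_array = [0 for i in range(len(new_coord_array))]
--     #left_indexes_array[-1] = len(orig_coord_array) - 1
--     for i in range(0, len(new_coord_array)):
--         left_indexes_array[i] = search_for_next_left_index(orig_coord_array, last_left_index, new_coord_array[i])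
--         last_left_index = left_indexes_array[i]
--     return left_indexes_array
-- ===== SOURCE B (Python) =====
-- def build_left_index_map_between_arrays(orig_coord_array, new_coord_array):
--     # Build a max segment tree over orig_coord_array once, then answer each
--     # query "first index >= start whose coordinate exceeds the value" in
--     # O(log n) instead of A's linear rescan.
--     def build(lo, hi):
--         # tree node: (subtree max, left child, right child, lo, hi) over [lo, hi)
--         if hi - lo == 1:
--             return (orig_coord_array[lo], None, None, lo, hi)
--         mid = (lo + hi) // 2
--         left = build(lo, mid)
--         right = build(mid, hi)
--         return (max(left[0], right[0]), left, right, lo, hi)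
--
--     def first_gt(t, l, v):
--         # leftmost index i in t's range with i >= l and orig_coord_array[i] > v
--         m, left, right, lo, hi = t
--         if hi <= l or m <= v:
--             return None
--         if left is None:
--             return lo
--         r = first_gt(left, l, v)
--         return r if r is not None else first_gt(right, l, v)
--
--     n = len(orig_coord_array)
--     tree = build(0, n) if n else None
--     result = []
--     last = 0
--     for v in new_coord_array:
--         j = first_gt(tree, last, v) if n else None
--         last = j - 1 if j is not None else last
--         result.append(last)
--     return result
-- ===== Notes on version B (the rewrite author's own statement) =====
-- stated objective: faster
-- what changed: B builds a max segment tree over orig_coord_array once and answers each query ('first index >= running start whose coordinate exceeds the value') by an O(log n) pruned tree descent, instead of A's per-query linear rescan.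
-- outside the precondition, e.g. on build_left_index_map_between_arrays([5], [0, 0]): A returns [-1, -2], B returns [-1, -1]; on build_left_index_map_between_arrays([2, 4], [1, 0, 5]): A returns [-1, -2, -2], B returns [-1, -1, -1]
import Mathlib
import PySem

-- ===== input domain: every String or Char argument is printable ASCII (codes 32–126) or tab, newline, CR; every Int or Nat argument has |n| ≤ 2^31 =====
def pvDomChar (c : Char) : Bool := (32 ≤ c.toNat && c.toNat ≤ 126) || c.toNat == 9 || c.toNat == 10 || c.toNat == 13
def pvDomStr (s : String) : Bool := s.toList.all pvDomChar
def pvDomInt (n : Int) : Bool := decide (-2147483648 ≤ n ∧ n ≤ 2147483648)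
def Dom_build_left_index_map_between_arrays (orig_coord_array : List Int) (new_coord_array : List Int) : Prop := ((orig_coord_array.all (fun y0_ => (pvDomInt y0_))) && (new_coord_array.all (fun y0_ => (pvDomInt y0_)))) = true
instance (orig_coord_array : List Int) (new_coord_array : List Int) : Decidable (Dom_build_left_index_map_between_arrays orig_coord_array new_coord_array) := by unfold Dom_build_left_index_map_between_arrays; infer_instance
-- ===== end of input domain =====

-- B builds a max segment tree over orig_coord_array once and answers each
-- query ("first index ≥ start whose coordinate exceeds the value") by a
-- pruned tree descent instead of A's per-query linear rescan; exact on
-- arbitrary (also unsorted) arrays inside Pre_.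

-- ===== PORT A =====
-- the 'for i in range(start_index, len(array))' loop of search_for_next_left_index
def pvScanA (array : List Int) (value : Int) (start : Int) : List Int → Int
  | [] => start
  | i :: rest =>
    match PySem.List.pyGet? array i with
    | some x => if x > value then i - 1 else pvScanA array value start rest
    | none => start   -- IndexError (Python raises); unreachable under Pre_

def pvSearchForNextLeftIndex (array : List Int) (start_index : Int) (value : Int) : Int :=
  pvScanA array value start_index (PySem.List.pyRange start_index (array.length : Int) 1)

def pvBuildA (orig : List Int) : List Int → Int → List Int
  | [], _ => []
  | v :: rest, last =>
    let li := pvSearchForNextLeftIndex orig last v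
    li :: pvBuildA orig rest li

def build_left_index_map_between_arrays (orig_coord_array : List Int) (new_coord_array : List Int) : List Int :=
  pvBuildA orig_coord_array new_coord_array 0

-- ===== PORT B =====
-- Source B's tree tuple (max, left, right, lo, hi) / leaf (max, None, None, lo, hi)
inductive PvTree where
  | leaf : Int → Nat → Nat → PvTree
  | node : Int → PvTree → PvTree → Nat → Nat → PvTree

def pvTreeMax : PvTree → Int
  | PvTree.leaf m _ _ => m
  | PvTree.node m _ _ _ _ => m

-- Source B's build(lo, hi); Source B tests 'hi - lo == 1', the '≤ 1' only totalizes
-- the hi ≤ lo case on which Python's build would recurse forever (never called)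
def pvBuildTree (a : List Int) (lo hi : Nat) : PvTree :=
  if hi - lo ≤ 1 then
    PvTree.leaf (PySem.List.pyGetD a (lo : Int) 0) lo hi
  else
    let mid := (lo + hi) / 2
    let left := pvBuildTree a lo mid
    let right := pvBuildTree a mid hi
    PvTree.node (max (pvTreeMax left) (pvTreeMax right)) left right lo hi
termination_by hi - lo
decreasing_by all_goals omega

-- Source B's first_gt(t, l, v)
def pvFirstGT (v : Int) (l : Int) : PvTree → Option Nat
  | PvTree.leaf m lo hi => if (hi : Int) ≤ l ∨ m ≤ v then none else some lo
  | PvTree.node m left right _ hi =>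
    if (hi : Int) ≤ l ∨ m ≤ v then none
    else
      match pvFirstGT v l left with
      | some r => some r
      | none => pvFirstGT v l right

def pvBuildB (tree : Option PvTree) : List Int → Int → List Int
  | [], _ => []
  | v :: rest, last =>
    let j := match tree with | some t => pvFirstGT v last t | none => none
    let cur := match j with | some jj => (jj : Int) - 1 | none => last
    cur :: pvBuildB tree rest cur

def build_left_index_map_between_arrays_alt (orig_coord_array : List Int) (new_coord_array : List Int) : List Int :=
  pvBuildB (if orig_coord_array.length ≠ 0 then some (pvBuildTree orig_coord_array 0 orig_coord_array.length) else none)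
    new_coord_array 0

-- ===== PRECONDITION & SPEC =====
-- Pre_ excludes inputs where some query BEFORE the last one lies below the
-- first original coordinate: on those A's running start index goes negative,
-- so its later scans read elements through Python's negative-index wraparound
-- (and raise IndexError once the index drops below -len), values no
-- left-neighbor search would specify; B scans forward from the array start
-- there. The exact set of inputs whose trace goes negative is not expressible
-- without replaying the loop, so Pre_ states this slightly stronger
-- closed-form bound (it admits every input whose queries, except possibly the
-- final one, are ≥ the first coordinate).
def Pre_build_left_index_map_between_arrays (orig_coord_array : List Int) (new_coord_array : List Int) : Prop :=
  ∀ v ∈ new_coord_array.dropLast, ∀ h ∈ orig_coord_array.head?, h ≤ v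
instance (orig_coord_array : List Int) (new_coord_array : List Int) : Decidable (Pre_build_left_index_map_between_arrays orig_coord_array new_coord_array) := by unfold Pre_build_left_index_map_between_arrays; infer_instance

def pvWitness_build_left_index_map_between_arrays : List Int × List Int := ([1, 3, 2, 7], [2, 4, 1])

def Spec_build_left_index_map_between_arrays (orig_coord_array : List Int) (new_coord_array : List Int) (out : List Int) : Prop := out = build_left_index_map_between_arrays_alt orig_coord_array new_coord_array
instance (orig_coord_array : List Int) (new_coord_array : List Int) (out : List Int) : Decidable (Spec_build_left_index_map_between_arrays orig_coord_array new_coord_array out) := by unfold Spec_build_left_index_map_between_arrays; infer_instance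

-- ===== CLAIM (what is proved, stated in full; the proofs are below) =====
def Claim_equal_build_left_index_map_between_arrays : Prop := ∀ (orig_coord_array : List Int) (new_coord_array : List Int), Dom_build_left_index_map_between_arrays orig_coord_array new_coord_array → Pre_build_left_index_map_between_arrays orig_coord_array new_coord_array → Spec_build_left_index_map_between_arrays orig_coord_array new_coord_array (build_left_index_map_between_arrays orig_coord_array new_coord_array)

-- ===== LEMMAS AND PROOFS =====

-- reference: smallest index j ≥ s with a[j] > v, if any
def pvRefFind (a : List Int) (v : Int) (s : Nat) : Option Nat :=
  if h : s < a.length then (if v < a[s] then some s else pvRefFind a v (s + 1)) else none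
termination_by a.length - s

theorem pvRefFind_none (a : List Int) (v : Int) (s : Nat) (hnone : pvRefFind a v s = none) :
    ∀ i : Nat, s ≤ i → (h : i < a.length) → a[i] ≤ v := by
  induction s using pvRefFind.induct a v with
  | case1 s h hv => rw [pvRefFind] at hnone; simp [h, hv] at hnone
  | case2 s h hv ih =>
    rw [pvRefFind] at hnone; simp [h, hv] at hnone
    intro i hsi hi
    rcases Nat.eq_or_lt_of_le hsi with rfl | hlt
    · omega
    · exact ih hnone i hlt hi
  | case3 s h =>
    intro i hsi hi; omega

theorem pvRefFind_some (a : List Int) (v : Int) (s j : Nat) (hsome : pvRefFind a v s = some j) :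
    s ≤ j ∧ ∃ h : j < a.length, v < a[j] ∧ ∀ i : Nat, s ≤ i → i < j → ∀ h' : i < a.length, a[i] ≤ v := by
  induction s using pvRefFind.induct a v with
  | case1 s h hv =>
    rw [pvRefFind] at hsome; simp [h, hv] at hsome
    subst hsome
    exact ⟨le_refl _, h, hv, fun i hsi hij _ => by omega⟩
  | case2 s h hv ih =>
    rw [pvRefFind] at hsome; simp [h, hv] at hsome
    obtain ⟨hsj, hj, hgt, hmin⟩ := ih hsome
    refine ⟨by omega, hj, hgt, fun i hsi hij hi => ?_⟩
    rcases Nat.eq_or_lt_of_le hsi with rfl | hlt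
    · omega
    · exact hmin i hlt hij hi
  | case3 s h => rw [pvRefFind] at hsome; simp [h] at hsome

theorem pvScanA_eq (a : List Int) (v : Int) (start : Int) (s : Nat) (hsn : s ≤ a.length) :
    pvScanA a v start (PySem.List.pyRange (s : Int) (a.length : Int) 1) =
      (match pvRefFind a v s with
       | some j => (j : Int) - 1
       | none => start) := by
  induction s using pvRefFind.induct a v with
  | case1 s h hv =>
    rw [PySem.List.pyRange_one_cons (by exact_mod_cast h)]
    rw [pvRefFind]; simp only [h, hv, dif_pos, if_pos]
    simp [pvScanA, PySem.List.pyGet?_natCast, List.getElem?_eq_getElem h, hv]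
  | case2 s h hv ih =>
    rw [PySem.List.pyRange_one_cons (by exact_mod_cast h)]
    rw [pvRefFind]; simp only [h, hv, dif_pos]
    have hc : ((s : Int) + 1) = ((s + 1 : Nat) : Int) := by push_cast; ring
    rw [hc]
    simp only [pvScanA, PySem.List.pyGet?_natCast, List.getElem?_eq_getElem h]
    rw [if_neg (by simpa using hv)]
    exact ih h
  | case3 s h =>
    have hs : s = a.length := by omega
    subst hs
    rw [pvRefFind]; simp only [h, dif_neg, not_false_iff]
    rw [PySem.List.pyRange_one]
    simp [pvScanA]

theorem pvSearch_eq (a : List Int) (v : Int) (s : Nat) (hsn : s ≤ a.length) :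
    pvSearchForNextLeftIndex a (s : Int) v =
      (match pvRefFind a v s with
       | some j => (j : Int) - 1
       | none => (s : Int)) := by
  unfold pvSearchForNextLeftIndex
  exact pvScanA_eq a v (s : Int) s hsn

theorem pvGetD_elem (a : List Int) (i : Nat) (h : i < a.length) :
    PySem.List.pyGetD a (i : Int) 0 = a[i] := by
  have h2 := PySem.List.pyGetD_eq_getElem (xs := a) (i := (i : Int)) (d := 0)
    (by omega) (by exact_mod_cast h)
  simpa using h2

theorem pvBuildTree_unfold_leaf (a : List Int) (lo hi : Nat) (h : hi - lo ≤ 1) :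
    pvBuildTree a lo hi = PvTree.leaf (PySem.List.pyGetD a (lo : Int) 0) lo hi := by
  rw [pvBuildTree, if_pos h]

theorem pvBuildTree_unfold_node (a : List Int) (lo hi : Nat) (h : ¬ hi - lo ≤ 1) :
    pvBuildTree a lo hi = PvTree.node
      (max (pvTreeMax (pvBuildTree a lo ((lo + hi) / 2))) (pvTreeMax (pvBuildTree a ((lo + hi) / 2) hi)))
      (pvBuildTree a lo ((lo + hi) / 2)) (pvBuildTree a ((lo + hi) / 2) hi) lo hi := by
  rw [pvBuildTree, if_neg h]

theorem pvTreeMax_build (a : List Int) :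
    ∀ (lo hi : Nat), lo < hi → hi ≤ a.length →
      ∀ i : Nat, lo ≤ i → i < hi → ∀ h : i < a.length, a[i] ≤ pvTreeMax (pvBuildTree a lo hi) := by
  intro lo hi
  induction lo, hi using pvBuildTree.induct a with
  | case1 lo hi h =>
    intro hlh hhn i h1 h2 hi'
    have he : i = lo := by omega
    subst he
    rw [pvBuildTree_unfold_leaf a i hi h]
    show a[i] ≤ PySem.List.pyGetD a (i : Int) 0
    rw [pvGetD_elem a i hi']
  | case2 lo hi h mid ihl ihr =>
    intro hlh hhn i h1 h2 hi'
    rw [pvBuildTree_unfold_node a lo hi h]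
    show a[i] ≤ max (pvTreeMax (pvBuildTree a lo ((lo + hi) / 2))) (pvTreeMax (pvBuildTree a ((lo + hi) / 2) hi))
    have hmid1 : lo < (lo + hi) / 2 := by omega
    have hmid2 : (lo + hi) / 2 < hi := by omega
    by_cases hc : i < (lo + hi) / 2
    · exact le_trans (ihl hmid1 (by omega) i h1 hc hi') (le_max_left _ _)
    · exact le_trans (ihr hmid2 hhn i (by omega) h2 hi') (le_max_right _ _)

theorem pvFirstGT_post (a : List Int) (v : Int) (l : Int) :
    ∀ (lo hi : Nat), lo < hi → hi ≤ a.length →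
      (match pvFirstGT v l (pvBuildTree a lo hi) with
       | some j => l ≤ (j : Int) ∧ lo ≤ j ∧ j < hi ∧ (∃ h : j < a.length, v < a[j]) ∧
           (∀ i : Nat, lo ≤ i → l ≤ (i : Int) → i < j → ∀ h : i < a.length, a[i] ≤ v)
       | none => ∀ i : Nat, lo ≤ i → l ≤ (i : Int) → i < hi → ∀ h : i < a.length, a[i] ≤ v) := by
  intro lo hi
  induction lo, hi using pvBuildTree.induct a with
  | case1 lo hi h =>
    intro hlh hhn
    rw [pvBuildTree_unfold_leaf a lo hi h]
    show (match (if (hi : Int) ≤ l ∨ PySem.List.pyGetD a (lo : Int) 0 ≤ v then none else some lo) with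
       | some j => _ | none => _)
    by_cases hc : (hi : Int) ≤ l ∨ PySem.List.pyGetD a (lo : Int) 0 ≤ v
    · rw [if_pos hc]
      intro i hi1 hi2 hi3 hi4
      have he : i = lo := by omega
      subst he
      rcases hc with hc | hc
      · omega
      · rw [pvGetD_elem a i hi4] at hc; exact hc
    · rw [if_neg hc]
      push Not at hc
      obtain ⟨hc1, hc2⟩ := hc
      have hlo : lo < a.length := by omega
      rw [pvGetD_elem a lo hlo] at hc2
      exact ⟨by omega, le_refl _, by omega, ⟨hlo, hc2⟩, fun i hi1 hi2 hi3 hi4 => by omega⟩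
  | case2 lo hi h mid ihl ihr =>
    intro hlh hhn
    have hmid1 : lo < (lo + hi) / 2 := by omega
    have hmid2 : (lo + hi) / 2 < hi := by omega
    rw [pvBuildTree_unfold_node a lo hi h]
    show (match (if (hi : Int) ≤ l ∨ max (pvTreeMax (pvBuildTree a lo ((lo + hi) / 2))) (pvTreeMax (pvBuildTree a ((lo + hi) / 2) hi)) ≤ v then none
         else match pvFirstGT v l (pvBuildTree a lo ((lo + hi) / 2)) with
              | some r => some r
              | none => pvFirstGT v l (pvBuildTree a ((lo + hi) / 2) hi)) with
       | some j => _ | none => _)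
    by_cases hc : (hi : Int) ≤ l ∨ max (pvTreeMax (pvBuildTree a lo ((lo + hi) / 2))) (pvTreeMax (pvBuildTree a ((lo + hi) / 2) hi)) ≤ v
    · rw [if_pos hc]
      intro i hi1 hi2 hi3 hi4
      rcases hc with hc | hc
      · omega
      · by_cases hcl : i < (lo + hi) / 2
        · have := pvTreeMax_build a lo ((lo + hi) / 2) hmid1 (by omega) i hi1 hcl hi4
          omega
        · have := pvTreeMax_build a ((lo + hi) / 2) hi hmid2 hhn i (by omega) hi3 hi4
          omega
    · rw [if_neg hc]
      have hL := ihl hmid1 (by omega)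
      cases hql : pvFirstGT v l (pvBuildTree a lo ((lo + hi) / 2)) with
      | some r =>
        rw [hql] at hL
        dsimp only
        obtain ⟨p1, p2, p3, p4, p5⟩ := hL
        exact ⟨p1, p2, by omega, p4, fun i h1 h2 h3 h4 => p5 i h1 h2 h3 h4⟩
      | none =>
        rw [hql] at hL
        dsimp only
        have hR := ihr hmid2 hhn
        cases hqr : pvFirstGT v l (pvBuildTree a ((lo + hi) / 2) hi) with
        | some r =>
          rw [hqr] at hR
          obtain ⟨p1, p2, p3, p4, p5⟩ := hR
          refine ⟨p1, by omega, p3, p4, fun i h1 h2 h3 h4 => ?_⟩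
          by_cases hcl : i < (lo + hi) / 2
          · exact hL i h1 h2 hcl h4
          · exact p5 i (by omega) h2 h3 h4
        | none =>
          rw [hqr] at hR
          intro i h1 h2 h3 h4
          by_cases hcl : i < (lo + hi) / 2
          · exact hL i h1 h2 hcl h4
          · exact hR i (by omega) h2 h3 h4

theorem pvFirstGT_root (a : List Int) (v : Int) (s : Nat) (hne : 0 < a.length) :
    pvFirstGT v (s : Int) (pvBuildTree a 0 a.length) = pvRefFind a v s := by
  have hpost := pvFirstGT_post a v (s : Int) 0 a.length hne (le_refl _)
  cases hq : pvFirstGT v (s : Int) (pvBuildTree a 0 a.length) with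
  | none =>
    rw [hq] at hpost
    cases hr : pvRefFind a v s with
    | none => rfl
    | some j =>
      obtain ⟨h1, h2, h3, _⟩ := pvRefFind_some a v s j hr
      have := hpost j (Nat.zero_le _) (by exact_mod_cast h1) h2 h2
      omega
  | some r =>
    rw [hq] at hpost
    obtain ⟨p1, p2, p3, ⟨p4h, p4⟩, p5⟩ := hpost
    cases hr : pvRefFind a v s with
    | none =>
      have := pvRefFind_none a v s hr r (by exact_mod_cast p1) p4h
      omega
    | some j =>
      obtain ⟨h1, h2, h3, h4⟩ := pvRefFind_some a v s j hr
      congr 1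
      by_contra hne'
      rcases Nat.lt_or_ge r j with hlt | hge
      · have := h4 r (by exact_mod_cast p1) hlt p4h
        omega
      · have hjr : j < r := by omega
        have := p5 j (Nat.zero_le _) (by exact_mod_cast h1) hjr h2
        omega

theorem pvBuildB_cons (tree : Option PvTree) (v : Int) (rest : List Int) (last : Int) :
    pvBuildB tree (v :: rest) last =
      (match (match tree with | some t => pvFirstGT v last t | none => none) with
       | some jj => (jj : Int) - 1 | none => last) ::
      pvBuildB tree rest
        (match (match tree with | some t => pvFirstGT v last t | none => none) with
         | some jj => (jj : Int) - 1 | none => last) := rfl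

theorem pvBuild_eq (a : List Int) (new : List Int) :
    ∀ s : Nat, s ≤ a.length → (∀ v ∈ new.dropLast, ∀ h ∈ a.head?, h ≤ v) →
    pvBuildA a new (s : Int) =
      pvBuildB (if a.length ≠ 0 then some (pvBuildTree a 0 a.length) else none) new (s : Int) := by
  induction new with
  | nil => intro s _ _; rfl
  | cons v rest ih =>
    intro s hsn hv
    have hA := pvSearch_eq a v s hsn
    have hj : (match (if a.length ≠ 0 then some (pvBuildTree a 0 a.length) else none) with
        | some t => pvFirstGT v (s : Int) t | none => none) = pvRefFind a v s := by
      by_cases hz : a.length = 0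
      · simp only [hz, ne_eq, not_true_eq_false, if_false]
        rw [pvRefFind, dif_neg (by omega)]
      · simp only [ne_eq, hz, not_false_iff, if_pos]
        exact pvFirstGT_root a v s (by omega)
    rw [pvBuildB_cons, hj]
    show pvSearchForNextLeftIndex a (s : Int) v :: pvBuildA a rest (pvSearchForNextLeftIndex a (s : Int) v) = _
    rw [hA]
    have hv' : ∀ w ∈ rest.dropLast, ∀ h ∈ a.head?, h ≤ w := by
      intro w hw
      cases rest with
      | nil => simp at hw
      | cons r0 rs =>
        exact hv w (by rw [List.dropLast_cons₂]; exact List.mem_cons_of_mem _ hw)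
    cases hr : pvRefFind a v s with
    | none =>
      dsimp only
      exact congrArg _ (ih s hsn hv')
    | some j =>
      dsimp only
      obtain ⟨hsj, hjn, hgt, _⟩ := pvRefFind_some a v s j hr
      cases rest with
      | nil => rfl
      | cons r0 rs =>
        -- v is not the last query, so v is at least the head a[0] and j ≥ 1
        have hvhead : ∀ h ∈ a.head?, h ≤ v := by
          refine hv v ?_
          rw [List.dropLast_cons₂]
          exact List.mem_cons_self
        have hane : 0 < a.length := by omega
        have hhead : a.head? = some (a[0]'(hane)) := by
          cases a with
          | nil => simp at hane
          | cons x t => simp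
        have h0v : a[0]'(hane) ≤ v := hvhead _ hhead
        have hj1 : 1 ≤ j := by
          by_contra hj0
          have hz : j = 0 := by omega
          subst hz
          omega
        have hcast : (j : Int) - 1 = ((j - 1 : Nat) : Int) := by omega
        rw [hcast]
        exact congrArg _ (ih (j - 1) (by omega) hv')

-- ===== VERDICT (by name: the statement is the Claim_ definition above) =====
theorem build_left_index_map_between_arrays_spec : Claim_equal_build_left_index_map_between_arrays := by
  intro o n _ hpre
  unfold Spec_build_left_index_map_between_arrays
  unfold build_left_index_map_between_arrays build_left_index_map_between_arrays_alt
  have := pvBuild_eq o n 0 (Nat.zero_le _) hpre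
  simpa using this
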